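-- pv_equiv track=rewrite | github.com/liz1czapla3955/csvwrangler | csvwrangler/lagged.py | lag_rows
-- ===== SOURCE A (Python) =====
-- from typing import Iterable, Iterator
--
-- def lag_rows(
--     rows: Iterable[dict],
--     column: str,
--     n: int = 1,
--     output_column: str | None = None,
--     fill: str = "",
--     lead: bool = False,
-- ) -> Iterator[dict]:
--     """Yield rows with a new column containing the lagged (or lead) value.
--
--     Args:
--         rows: Iterable of row dicts.
--         column: Source column to lag/lead.
--         n: Number of positions to shift.  Positive = lag (look back),
--            negative values are treated as abs(n) lead regardless of `lead`.
--         output_column: Name of the new column.  Defaults to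
--            '<column>_lag<n>' or '<column>_lead<n>'.
--         fill: Value to use when no prior/future row exists.
--         lead: If True, shift forward (look ahead) instead of back.
--     """
--     if n < 0:
--         lead = True
--         n = abs(n)
--
--     direction = "lead" if lead else "lag"
--     out_col = output_column or f"{column}_{direction}{n}"
--
--     rows_list = list(rows)
--     total = len(rows_list)
--
--     for i, row in enumerate(rows_list):
--         new_row = dict(row)
--         if lead:
--             src_idx = i + n
--         else:
--             src_idx = i - n
--
--         if 0 <= src_idx < total:
--             new_row[out_col] = rows_list[src_idx].get(column, fill)
--         else:
--             new_row[out_col] = fill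
--         yield new_row
-- ===== SOURCE B (Python) =====
-- def lag_rows(rows, column, n=1, output_column=None, fill="", lead=False):
--     """Shift-and-zip reimplementation: build the column of values once, shift it
--     with padding, and zip it back onto the rows (no per-row index arithmetic)."""
--     if n < 0:
--         lead = True
--         n = abs(n)
--     direction = "lead" if lead else "lag"
--     out_col = output_column or f"{column}_{direction}{n}"
--     rows_list = list(rows)
--     vals = [r.get(column, fill) for r in rows_list]
--     k = min(n, len(vals))
--     if lead:
--         shifted = vals[n:] + [fill] * k
--     else:
--         shifted = [fill] * k + vals[:len(vals) - k]
--     for row, v in zip(rows_list, shifted):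
--         new_row = dict(row)
--         new_row[out_col] = v
--         yield new_row
-- ===== Notes on version B (the rewrite author's own statement) =====
-- stated objective: alternative
-- what changed: Instead of per-row index arithmetic (enumerate + bounds check + random access into the materialized list), B extracts the value column once, builds the shifted column by list slicing plus fill padding, and zips it back onto the rows.
import Mathlib
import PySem

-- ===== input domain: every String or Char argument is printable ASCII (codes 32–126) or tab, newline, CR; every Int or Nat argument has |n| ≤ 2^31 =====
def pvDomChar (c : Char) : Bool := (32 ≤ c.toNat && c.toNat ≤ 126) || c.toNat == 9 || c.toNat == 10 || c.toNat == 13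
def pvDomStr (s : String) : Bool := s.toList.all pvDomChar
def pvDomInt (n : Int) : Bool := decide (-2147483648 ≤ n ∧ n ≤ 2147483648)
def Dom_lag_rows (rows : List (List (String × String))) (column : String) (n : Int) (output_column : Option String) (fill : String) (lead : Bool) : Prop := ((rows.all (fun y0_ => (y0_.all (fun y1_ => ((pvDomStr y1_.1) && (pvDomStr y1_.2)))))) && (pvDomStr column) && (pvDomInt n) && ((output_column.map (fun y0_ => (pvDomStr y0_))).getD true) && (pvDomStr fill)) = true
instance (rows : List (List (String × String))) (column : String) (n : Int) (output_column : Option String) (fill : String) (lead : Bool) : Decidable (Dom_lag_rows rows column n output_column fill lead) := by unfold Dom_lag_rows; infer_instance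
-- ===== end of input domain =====

-- B keeps A's prologue (normalize n<0 to lead, derive the output column name) unchanged,
-- then replaces the per-row index arithmetic by slicing/padding the value column and zipping it back.
-- Both yield fresh dict copies; the equivalence is about the returned rows.

-- ===== PORT A =====
-- shared prologue helper: out_col = output_column or f"{column}_{direction}{n}"  ('' is falsy)
def pvOutCol (column : String) (output_column : Option String) (lead1 : Bool) (n1 : Int) : String :=
  match output_column with
  | some s => if s = "" then column ++ "_" ++ (if lead1 then "lead" else "lag") ++ PySem.Int.toStr n1 else s
  | none => column ++ "_" ++ (if lead1 then "lead" else "lag") ++ PySem.Int.toStr n1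

def lag_rows (rows : List (List (String × String))) (column : String) (n : Int) (output_column : Option String) (fill : String) (lead : Bool) : List (List (String × String)) :=
  let lead1 := lead || decide (n < 0)
  let n1 := if n < 0 then -n else n
  let out_col := pvOutCol column output_column lead1 n1
  let total : Int := rows.length
  (PySem.List.enumerate rows).map (fun p =>
    let src := if lead1 then p.1 + n1 else p.1 - n1
    let v := if 0 ≤ src ∧ src < total then
        PySem.Dict.getD (PySem.Dict.ofList ((PySem.List.pyGet? rows src).getD [])) column fill
      else fill
    ((PySem.Dict.ofList p.2).insert out_col v).items)

-- ===== PORT B =====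
def lag_rows_alt (rows : List (List (String × String))) (column : String) (n : Int) (output_column : Option String) (fill : String) (lead : Bool) : List (List (String × String)) :=
  let lead1 := lead || decide (n < 0)
  let n1 := if n < 0 then -n else n
  let out_col := pvOutCol column output_column lead1 n1
  let vals := rows.map (fun r => PySem.Dict.getD (PySem.Dict.ofList r) column fill)
  let k : Int := min n1 (rows.length : Int)
  let shifted := if lead1 then PySem.List.slice vals (some n1) none ++ PySem.List.pyRepeat [fill] k
                 else PySem.List.pyRepeat [fill] k ++ PySem.List.slice vals none (some ((rows.length : Int) - k))
  (rows.zip shifted).map (fun q => ((PySem.Dict.ofList q.1).insert out_col q.2).items)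

-- ===== PRECONDITION & SPEC =====
def Spec_lag_rows (rows : List (List (String × String))) (column : String) (n : Int) (output_column : Option String) (fill : String) (lead : Bool) (out : List (List (String × String))) : Prop := out = lag_rows_alt rows column n output_column fill lead
instance (rows : List (List (String × String))) (column : String) (n : Int) (output_column : Option String) (fill : String) (lead : Bool) (out : List (List (String × String))) : Decidable (Spec_lag_rows rows column n output_column fill lead out) := by unfold Spec_lag_rows; infer_instance

-- ===== CLAIM (what is proved, stated in full; the proofs are below) =====
def Claim_equal_lag_rows : Prop := ∀ (rows : List (List (String × String))) (column : String) (n : Int) (output_column : Option String) (fill : String) (lead : Bool), Dom_lag_rows rows column n output_column fill lead → Spec_lag_rows rows column n output_column fill lead (lag_rows rows column n output_column fill lead)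

-- ===== LEMMAS AND PROOFS =====

-- Core equivalence: enumerate + bounds-checked index lookup  =  zip with shifted column.
theorem pv_core {α β : Type} (rows : List α) (dflt : α) (g : α → String) (fill : String)
    (h : α → String → β) (lead1 : Bool) (m : Nat) :
    (PySem.List.enumerate rows).map (fun p =>
      h p.2 (if 0 ≤ (if lead1 then p.1 + (m : Int) else p.1 - (m : Int)) ∧
                (if lead1 then p.1 + (m : Int) else p.1 - (m : Int)) < (rows.length : Int)
             then g ((PySem.List.pyGet? rows (if lead1 then p.1 + (m : Int) else p.1 - (m : Int))).getD dflt)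
             else fill))
    = (rows.zip (if lead1 then (rows.map g).drop m ++ List.replicate (min m rows.length) fill
                 else List.replicate (min m rows.length) fill ++ (rows.map g).take (rows.length - min m rows.length))).map
        (fun q => h q.1 q.2) := by
  cases lead1 with
  | false =>
    apply List.ext_getElem
    · simp only [Bool.false_eq_true, if_false, List.length_map, PySem.List.length_enumerate,
        List.length_zip, List.length_append, List.length_replicate, List.length_take]
      omega
    · intro i h1 h2
      have hi : i < rows.length := by
        simpa [PySem.List.length_enumerate] using h1
      simp only [List.getElem_map, PySem.List.getElem_enumerate, List.getElem_zip,
        Bool.false_eq_true, if_false, zero_add]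
      congr 1
      by_cases hm : m ≤ i
      · have hk : min m rows.length = m := by omega
        rw [if_pos (by constructor <;> omega)]
        have hcast : (i : Int) - (m : Int) = ((i - m : Nat) : Int) := by omega
        rw [hcast, PySem.List.pyGet?_natCast,
          List.getElem?_eq_getElem (by omega : i - m < rows.length)]
        rw [List.getElem_append]
        rw [dif_neg (by simp only [List.length_replicate, hk]; omega)]
        simp [hk, List.getElem_take, List.getElem_map]
      · rw [if_neg (by omega)]
        rw [List.getElem_append, dif_pos (by simp only [List.length_replicate]; omega)]
        exact (List.getElem_replicate _).symm
  | true =>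
    apply List.ext_getElem
    · simp only [if_true, List.length_map, PySem.List.length_enumerate,
        List.length_zip, List.length_append, List.length_replicate, List.length_drop]
      omega
    · intro i h1 h2
      have hi : i < rows.length := by
        simpa [PySem.List.length_enumerate] using h1
      simp only [List.getElem_map, PySem.List.getElem_enumerate, List.getElem_zip,
        if_true, zero_add]
      congr 1
      by_cases hm : i + m < rows.length
      · rw [if_pos (by constructor <;> omega)]
        have hcast : (i : Int) + (m : Int) = ((i + m : Nat) : Int) := by omega
        rw [hcast, PySem.List.pyGet?_natCast,
          List.getElem?_eq_getElem (by omega : i + m < rows.length)]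
        rw [List.getElem_append, dif_pos (by simp only [List.length_drop, List.length_map]; omega)]
        simp [List.getElem_drop, List.getElem_map, Nat.add_comm]
      · rw [if_neg (by omega)]
        rw [List.getElem_append, dif_neg (by simp only [List.length_drop, List.length_map]; omega)]
        exact (List.getElem_replicate _).symm

theorem lag_rows_spec : Claim_equal_lag_rows := by
  intro rows column n output_column fill lead _
  unfold Spec_lag_rows lag_rows lag_rows_alt
  simp only []
  set lead1 := lead || decide (n < 0) with hlead1
  set n1 := (if n < 0 then -n else n) with hn1
  have h0 : 0 ≤ n1 := by rw [hn1]; split <;> omega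
  set m := n1.toNat with hmdef
  have hm : (m : Int) = n1 := Int.toNat_of_nonneg h0
  have hrep : PySem.List.pyRepeat [fill] (min n1 (rows.length : Int))
      = List.replicate (min m rows.length) fill := by
    rw [PySem.List.pyRepeat_singleton]; congr 1; omega
  have hdrop : PySem.List.slice (rows.map fun r => PySem.Dict.getD (PySem.Dict.ofList r) column fill) (some n1) none
      = ((rows.map fun r => PySem.Dict.getD (PySem.Dict.ofList r) column fill)).drop m := by
    rw [PySem.List.slice_from _ h0]
  have htake : PySem.List.slice (rows.map fun r => PySem.Dict.getD (PySem.Dict.ofList r) column fill) none (some ((rows.length : Int) - min n1 (rows.length : Int)))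
      = ((rows.map fun r => PySem.Dict.getD (PySem.Dict.ofList r) column fill)).take (rows.length - min m rows.length) := by
    rw [PySem.List.slice_to _ (by omega)]; congr 1; omega
  set oc := pvOutCol column output_column lead1 n1 with hoc
  rw [hrep, hdrop, htake, ← hm]
  exact pv_core rows [] (fun r => PySem.Dict.getD (PySem.Dict.ofList r) column fill) fill
    (fun row v => ((PySem.Dict.ofList row).insert oc v).items)
    lead1 m
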